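-- pv_equiv track=rewrite | github.com/drakedeveloper/challenge1 | consecutive_increasing.py | validate_sequence
-- ===== SOURCE A (Python) =====
-- def validate_sequence(ch, start_num):
--     """
--     Validates if the string can be split into consecutive numbers starting with start_num.
--
--     Args:
--         ch: String of digits
--         start_num: Starting number of the sequence
--
--     Returns:
--         True if valid sequence exists, False otherwise
--     """
--     pos = 0
--     current_num = start_num
--     count = 0
--
--     while pos < len(ch):
--         current_str = str(current_num)
--
--         # Check if current number matches the string at current position
--         if ch[pos:pos + len(current_str)] == current_str:
--             pos += len(current_str)
--             current_num += 1
--             count += 1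
--         else:
--             return False
--
--     # Must have at least 2 numbers
--     return count >= 2
-- ===== SOURCE B (Python) =====
-- def validate_sequence(ch, start_num):
--     """Build the full expected string of consecutive numbers from start_num
--     until it is at least as long as ch, then compare once."""
--     expected = ''
--     current = start_num
--     count = 0
--     while len(expected) < len(ch):
--         expected += str(current)
--         current += 1
--         count += 1
--     return expected == ch and count >= 2
-- ===== Notes on version B (the rewrite author's own statement) =====
-- stated objective: simpler
-- what changed: Replaces the slice-by-slice compare-and-advance loop with early return by a single construction pass that builds the whole expected string and compares it to ch once at the end.
import Mathlib
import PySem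

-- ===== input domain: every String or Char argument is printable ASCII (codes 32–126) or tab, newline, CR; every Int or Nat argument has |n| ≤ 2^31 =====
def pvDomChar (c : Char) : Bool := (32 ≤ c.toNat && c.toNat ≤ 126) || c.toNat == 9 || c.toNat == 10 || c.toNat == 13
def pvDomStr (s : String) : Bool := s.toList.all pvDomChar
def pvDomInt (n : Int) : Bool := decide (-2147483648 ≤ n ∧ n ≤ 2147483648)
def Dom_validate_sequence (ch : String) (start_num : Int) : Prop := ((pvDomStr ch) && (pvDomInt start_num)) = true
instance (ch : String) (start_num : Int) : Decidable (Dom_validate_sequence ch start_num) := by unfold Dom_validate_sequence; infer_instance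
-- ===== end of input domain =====

-- B builds the whole expected string of consecutive numbers once and compares it to ch
-- at the end (simpler single construction pass), instead of A's slice-by-slice
-- compare-and-advance with early return.


-- str(n) is never empty (needed for termination of both loops)
theorem pvToCharsCore_len : ∀ (fuel n : Nat) (acc : List Char),
    acc.length ≤ (Nat.toDigitsCore 10 fuel n acc).length := by
  intro fuel
  induction fuel with
  | zero => intro n acc; simp [Nat.toDigitsCore]
  | succ f ih =>
    intro n acc
    rw [Nat.toDigitsCore]
    split
    · simp
    · calc acc.length ≤ (((n % 10).digitChar) :: acc).length := by simp
        _ ≤ _ := ih _ _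

theorem pvToChars_len (n : Int) : 1 ≤ (PySem.Int.toChars n).length := by
  unfold PySem.Int.toChars
  split
  · simp
  · unfold Nat.toDigits
    rw [Nat.toDigitsCore]
    split
    · simp
    · have h := pvToCharsCore_len n.toNat (n.toNat / 10) [(n.toNat % 10).digitChar]
      simpa using h

-- ===== PORT A =====
-- A's while loop; pos is a nonnegative index never exceeding the length, so the
-- Python slice ch[pos:pos+len(cs)] is exactly (chs.drop pos).take cs.length here.
def vsA_loop (chs : List Char) (pos : Nat) (cur count : Int) : Bool :=
  if _h : pos < chs.length then
    let cs := PySem.Int.toChars cur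
    if (chs.drop pos).take cs.length = cs then
      vsA_loop chs (pos + cs.length) (cur + 1) (count + 1)
    else false
  else decide (count ≥ 2)
termination_by chs.length - pos
decreasing_by have := pvToChars_len cur; omega

def validate_sequence (ch : String) (start_num : Int) : Bool :=
  vsA_loop ch.toList 0 start_num 0

-- ===== PORT B =====
-- B's while loop: append str(current) until expected is at least as long as ch.
def vsB_loop (chs expected : List Char) (cur count : Int) : List Char × Int :=
  if _h : expected.length < chs.length then
    vsB_loop chs (expected ++ PySem.Int.toChars cur) (cur + 1) (count + 1)
  else (expected, count)
termination_by chs.length - expected.length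
decreasing_by have := pvToChars_len cur; simp; omega

def validate_sequence_alt (ch : String) (start_num : Int) : Bool :=
  let r := vsB_loop ch.toList [] start_num 0
  decide (r.1 = ch.toList) && decide (r.2 ≥ 2)

-- ===== PRECONDITION & SPEC =====
def Spec_validate_sequence (ch : String) (start_num : Int) (out : Bool) : Prop := out = validate_sequence_alt ch start_num
instance (ch : String) (start_num : Int) (out : Bool) : Decidable (Spec_validate_sequence ch start_num out) := by unfold Spec_validate_sequence; infer_instance

-- ===== CLAIM (what is proved, stated in full; the proofs are below) =====
def Claim_equal_validate_sequence : Prop := ∀ (ch : String) (start_num : Int), Dom_validate_sequence ch start_num → Spec_validate_sequence ch start_num (validate_sequence ch start_num)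

-- ===== LEMMAS AND PROOFS =====

-- the string of consecutive numbers from cur whose length first reaches t, with its count
def pvBuild (t : Nat) (cur : Int) : List Char × Int :=
  if _h : 0 < t then
    let s := PySem.Int.toChars cur
    let r := pvBuild (t - s.length) (cur + 1)
    (s ++ r.1, r.2 + 1)
  else ([], 0)
termination_by t
decreasing_by have := pvToChars_len cur; omega

theorem vsB_loop_eq (chs : List Char) : ∀ (expected : List Char) (cur count : Int),
    vsB_loop chs expected cur count =
      (expected ++ (pvBuild (chs.length - expected.length) cur).1,
       count + (pvBuild (chs.length - expected.length) cur).2) := by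
  intro expected cur count
  fun_induction vsB_loop chs expected cur count with
  | case1 expected cur count h ih =>
    rw [ih]
    conv_rhs => rw [pvBuild]
    have ht : 0 < chs.length - expected.length := by omega
    simp only [ht, dif_pos]
    have hlen : chs.length - (expected ++ PySem.Int.toChars cur).length
        = chs.length - expected.length - (PySem.Int.toChars cur).length := by
      simp; omega
    rw [hlen, Prod.mk.injEq]
    exact ⟨by simp, by ring⟩
  | case2 expected cur count h =>
    have ht : chs.length - expected.length = 0 := by omega
    rw [ht, pvBuild]
    simp

theorem vsA_loop_eq (chs : List Char) : ∀ (pos : Nat) (cur count : Int), pos ≤ chs.length →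
    vsA_loop chs pos cur count =
      (decide (chs.drop pos = (pvBuild (chs.length - pos) cur).1)
        && decide (count + (pvBuild (chs.length - pos) cur).2 ≥ 2)) := by
  intro pos cur count hle
  fun_induction vsA_loop chs pos cur count with
  | case1 pos cur count h cs' hmatch ih =>
    -- matching step
    have hcs' : cs' = PySem.Int.toChars cur := rfl
    have hrem : cs'.length ≤ chs.length - pos := by
      have := congrArg List.length hmatch
      simp at this
      omega
    have hle' : pos + cs'.length ≤ chs.length := by omega
    rw [ih hle']
    have ht : 0 < chs.length - pos := by omega
    conv_rhs => rw [pvBuild]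
    simp only [ht, dif_pos, ← hcs']
    have hsub : chs.length - (pos + cs'.length) = chs.length - pos - cs'.length := by omega
    rw [hsub]
    have hdrop : chs.drop pos = cs' ++ chs.drop (pos + cs'.length) := by
      conv_lhs => rw [← List.take_append_drop cs'.length (chs.drop pos)]
      rw [hmatch, List.drop_drop]
    rw [hdrop]
    rw [Nat.add_comm pos cs'.length]
    congr 1
    · simp
    · have : count + 1 + (pvBuild (chs.length - pos - cs'.length) (cur + 1)).2
          = count + ((pvBuild (chs.length - pos - cs'.length) (cur + 1)).2 + 1) := by ring
      rw [this]
  | case2 pos cur count h cs' hmatch =>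
    -- mismatch: A returns False; B's expected cannot equal ch either
    have ht : 0 < chs.length - pos := by omega
    rw [pvBuild]
    simp only [ht, dif_pos]
    have hne : ¬ (chs.drop pos = PySem.Int.toChars cur ++ (pvBuild (chs.length - pos - (PySem.Int.toChars cur).length) (cur + 1)).1) := by
      intro hc
      apply hmatch
      show List.take (PySem.Int.toChars cur).length (List.drop pos chs) = PySem.Int.toChars cur
      rw [hc, List.take_left]
    simp [hne]
  | case3 pos cur count h =>
    have hpos : pos = chs.length := by omega
    subst hpos
    have ht : chs.length - chs.length = 0 := by omega
    rw [ht, pvBuild]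
    simp

-- ===== VERDICT (by name: the statement is the Claim_ definition above) =====
theorem validate_sequence_spec : Claim_equal_validate_sequence := by
  intro ch start_num _
  unfold Spec_validate_sequence validate_sequence validate_sequence_alt
  rw [vsA_loop_eq ch.toList 0 start_num 0 (by omega), vsB_loop_eq]
  simp [eq_comm]
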